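-- pv_equiv track=rewrite | github.com/windelbouwman/advent2020 | 13/main.py | calculate_departure_after
-- ===== SOURCE A (Python) =====
-- def calculate_departure_after(bus_id, after_timestamp):
--     remain = after_timestamp % bus_id
--     timestamp = after_timestamp - remain
--     assert timestamp <= after_timestamp
--     assert timestamp % bus_id == 0
--     while timestamp < after_timestamp:
--         timestamp += bus_id
--     return timestamp
-- ===== SOURCE B (Python) =====
-- def calculate_departure_after(bus_id, after_timestamp):
--     trips = -(-after_timestamp // bus_id)  # ceiling division: full bus cycles needed
--     return trips * bus_id
-- ===== Notes on version B (the rewrite author's own statement) =====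
-- stated objective: idiomatic
-- what changed: Instead of A's remainder-subtraction followed by a catch-up while loop, B counts the number of full bus cycles needed via ceiling division (-(-t // b)) and multiplies back; no remainder, no branch, no loop, no asserts.
import Mathlib
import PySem

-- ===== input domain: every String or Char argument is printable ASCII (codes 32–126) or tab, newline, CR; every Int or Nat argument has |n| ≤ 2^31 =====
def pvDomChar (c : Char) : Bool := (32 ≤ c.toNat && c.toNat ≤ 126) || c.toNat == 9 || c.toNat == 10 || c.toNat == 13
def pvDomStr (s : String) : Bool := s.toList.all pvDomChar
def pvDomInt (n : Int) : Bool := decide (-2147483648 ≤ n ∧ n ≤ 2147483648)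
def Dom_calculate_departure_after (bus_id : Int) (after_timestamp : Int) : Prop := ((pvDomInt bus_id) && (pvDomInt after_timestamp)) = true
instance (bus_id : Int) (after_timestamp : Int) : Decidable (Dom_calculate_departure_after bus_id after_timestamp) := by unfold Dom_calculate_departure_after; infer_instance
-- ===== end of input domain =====

-- B replaces A's remainder-subtraction + catch-up while loop by ceiling division (count full bus cycles, multiply back); objective: idiomatic.


-- ===== PORT A =====
-- the 'while timestamp < after_timestamp: timestamp += bus_id' loop; the '0 < bus_id'
-- conjunct in the guard is only a totality guard (under Pre_ the loop is reached only
-- with 0 < bus_id, where it matches Python exactly)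
def pvLoopA (bus_id after_timestamp timestamp : Int) : Int :=
  if _h : timestamp < after_timestamp ∧ 0 < bus_id then
    pvLoopA bus_id after_timestamp (timestamp + bus_id)
  else timestamp
termination_by (after_timestamp - timestamp).toNat
decreasing_by omega

def calculate_departure_after (bus_id : Int) (after_timestamp : Int) : Int :=
  let remain := PySem.Int.mod after_timestamp bus_id
  let timestamp := after_timestamp - remain
  -- the two asserts hold whenever Pre_ holds (they cannot fire inside Pre_)
  pvLoopA bus_id after_timestamp timestamp

-- ===== PORT B =====
def calculate_departure_after_alt (bus_id : Int) (after_timestamp : Int) : Int :=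
  let trips := -(PySem.Int.floordiv (-after_timestamp) bus_id)
  trips * bus_id

-- ===== PRECONDITION & SPEC =====
-- Pre_ excludes exactly the inputs where A raises: bus_id = 0 (ZeroDivisionError) and
-- bus_id < 0 with after_timestamp not a multiple (the first assert fails: Python's
-- remainder takes the divisor's sign, so timestamp > after_timestamp there).
def Pre_calculate_departure_after (bus_id : Int) (after_timestamp : Int) : Prop :=
  bus_id ≠ 0 ∧ (0 < bus_id ∨ bus_id ∣ after_timestamp)
instance (bus_id : Int) (after_timestamp : Int) : Decidable (Pre_calculate_departure_after bus_id after_timestamp) := by unfold Pre_calculate_departure_after; infer_instance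

def pvWitness_calculate_departure_after : Int × Int := (7, 23)

def Spec_calculate_departure_after (bus_id : Int) (after_timestamp : Int) (out : Int) : Prop := out = calculate_departure_after_alt bus_id after_timestamp
instance (bus_id : Int) (after_timestamp : Int) (out : Int) : Decidable (Spec_calculate_departure_after bus_id after_timestamp out) := by unfold Spec_calculate_departure_after; infer_instance

-- ===== CLAIM (what is proved, stated in full; the proofs are below) =====
def Claim_equal_calculate_departure_after : Prop := ∀ (bus_id : Int) (after_timestamp : Int), Dom_calculate_departure_after bus_id after_timestamp → Pre_calculate_departure_after bus_id after_timestamp → Spec_calculate_departure_after bus_id after_timestamp (calculate_departure_after bus_id after_timestamp)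

-- ===== LEMMAS AND PROOFS =====

-- one unfolding of the loop
theorem pvLoopA_eq (bus_id after_timestamp timestamp : Int) :
    pvLoopA bus_id after_timestamp timestamp =
      if timestamp < after_timestamp ∧ 0 < bus_id then
        pvLoopA bus_id after_timestamp (timestamp + bus_id)
      else timestamp := by
  rw [pvLoopA]; split <;> simp_all

-- ===== VERDICT (by name: the statement is the Claim_ definition above) =====
theorem calculate_departure_after_spec : Claim_equal_calculate_departure_after := by
  intro b t _ hpre
  obtain ⟨hne, hcase⟩ := hpre
  unfold Spec_calculate_departure_after calculate_departure_after calculate_departure_after_alt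
  simp only []
  set r := PySem.Int.mod t b with hr
  have hqr : PySem.Int.floordiv t b * b + r = t := PySem.Int.floordiv_mul_add_mod t b
  by_cases hb : 0 < b
  · -- positive bus_id
    have h0 : 0 ≤ r := PySem.Int.mod_nonneg t hb
    have h1 : r < b := PySem.Int.mod_lt t hb
    set q := PySem.Int.floordiv t b with hq
    rw [pvLoopA_eq]
    by_cases hz : r = 0
    · -- loop guard false immediately: A returns t
      rw [if_neg (by omega)]
      have hc : -(PySem.Int.floordiv (-t) b) = q := by
        rw [PySem.Int.neg_floordiv_neg_eq_iff_of_pos hb]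
        constructor <;> nlinarith
      rw [hc]; nlinarith
    · -- loop runs exactly once: A returns t - r + b
      rw [if_pos ⟨by omega, hb⟩, pvLoopA_eq, if_neg (by omega)]
      have hc : -(PySem.Int.floordiv (-t) b) = q + 1 := by
        rw [PySem.Int.neg_floordiv_neg_eq_iff_of_pos hb]
        have he : (q + 1 - 1) * b = q * b := by ring
        have hz0 : 0 < r := lt_of_le_of_ne h0 (Ne.symm hz)
        constructor
        · linarith [he, hqr, hz0]
        · nlinarith
      rw [hc]; ring_nf; nlinarith
  · -- negative bus_id, divisible: both return t
    have hdvd : b ∣ t := by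
      rcases hcase with h | h
      · exact absurd h hb
      · exact h
    have hz : r = 0 := (PySem.Int.mod_eq_zero_iff_dvd t b).mpr hdvd
    have hdvd' : b ∣ (-t) := hdvd.neg_right
    have hz' : PySem.Int.mod (-t) b = 0 := (PySem.Int.mod_eq_zero_iff_dvd (-t) b).mpr hdvd'
    have hq' : PySem.Int.floordiv (-t) b * b + PySem.Int.mod (-t) b = -t :=
      PySem.Int.floordiv_mul_add_mod (-t) b
    rw [hz, sub_zero, pvLoopA_eq, if_neg (by omega)]
    rw [hz'] at hq'
    nlinarith
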